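-- pv_equiv track=rewrite | github.com/Ammarbadawi18/foundations-cs-python | assignment_02_Ammar_Badawi.py | count_tags_recursive
-- ===== SOURCE A (Python) =====
-- def count_tags_recursive(html, tag):
--   start_tag = f"<{tag}>"
--   end_tag = f"</{tag}>"
--   count = 0
--   start_index = 0
--   while start_index < len(html):
--     start_index = html.find(start_tag, start_index)
--     if start_index == -1:
--       break
--     end_index = html.find(end_tag, start_index)
--     if end_index == -1:
--       break
--     count += 1
--     start_index = end_index + len(end_tag)
--   return count
-- ===== SOURCE B (Python) =====
-- import re
--
-- def count_tags_recursive(html, tag):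
--     # One regex scan: each non-overlapping, non-greedy match "<tag>...«first»</tag>"
--     # corresponds to one counted pair of A's find-loop.
--     pattern = re.escape(f"<{tag}>") + ".*?" + re.escape(f"</{tag}>")
--     return len(re.findall(pattern, html, re.DOTALL))
-- ===== Notes on version B (the rewrite author's own statement) =====
-- stated objective: idiomatic
-- what changed: Replaces the explicit while/str.find index-advancing loop with a single non-greedy regex scan (re.findall of escaped <tag>.*?</tag> with DOTALL), whose leftmost non-overlapping match semantics pair each open tag with the next close tag.
-- outside the precondition, e.g. on count_tags_recursive('<></></>', '></'): A returns 1, B returns 0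
import Mathlib
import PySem

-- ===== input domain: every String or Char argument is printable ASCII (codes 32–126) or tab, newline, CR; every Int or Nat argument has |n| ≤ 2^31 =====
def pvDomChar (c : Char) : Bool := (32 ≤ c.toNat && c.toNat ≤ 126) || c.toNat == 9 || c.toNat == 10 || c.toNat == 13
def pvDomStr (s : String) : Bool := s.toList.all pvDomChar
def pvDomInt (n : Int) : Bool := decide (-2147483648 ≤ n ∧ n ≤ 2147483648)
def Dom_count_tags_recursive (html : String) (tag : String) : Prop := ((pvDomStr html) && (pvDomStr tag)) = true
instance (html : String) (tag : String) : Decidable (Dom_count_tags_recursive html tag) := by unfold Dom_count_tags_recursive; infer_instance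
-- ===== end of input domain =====

-- B replaces A's explicit while/str.find index loop by one regex scan (re.findall of
-- escaped "<tag>.*?</tag>" with DOTALL); equivalence is proved for tags not containing '<'.


-- ===== PORT A =====
-- A's while loop: state (start_index, count); each iteration moves start_index past the
-- consumed close tag, so it grows by ≥ 3; fuel html.length + 1 therefore never runs out.
def pvALoop (h X Y : List Char) : Nat → Int → Int → Int
  | 0, _, count => count
  | fuel + 1, i, count =>
    if i < (h.length : Int) then
      -- p = html.find(start_tag, start_index); q = html.find(end_tag, p)  (p, q inlined)
      if PySem.Chars.findFrom h X i = -1 then count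
      else if PySem.Chars.findFrom h Y (PySem.Chars.findFrom h X i) = -1 then count
      else pvALoop h X Y fuel
        (PySem.Chars.findFrom h Y (PySem.Chars.findFrom h X i) + (Y.length : Int)) (count + 1)
    else count

-- f"<{tag}>" and f"</{tag}>" written as explicit char lists.
def count_tags_recursive (html : String) (tag : String) : Int :=
  pvALoop html.toList ('<' :: tag.toList ++ ['>']) ('<' :: '/' :: tag.toList ++ ['>'])
    (html.toList.length + 1) 0 0

-- ===== PORT B =====
-- re.findall(X + ".*?" + Y, html, DOTALL) for literal fragments X, Y: leftmost
-- non-overlapping matches, each ending at the FIRST occurrence of Y after the matched X.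
-- Ported exactly (for this pattern) as recursion on the remaining suffix: find X, then the
-- first Y after it, count 1 and continue past that Y.
def pvBCount (tagL : List Char) (s : List Char) : Int :=
  if hp : PySem.Chars.find s ('<' :: tagL ++ ['>']) = -1 then 0
  else
    if hq : PySem.Chars.find (s.drop ((PySem.Chars.find s ('<' :: tagL ++ ['>'])).toNat + (tagL.length + 2)))
        ('<' :: '/' :: tagL ++ ['>']) = -1 then 0
    else
      1 + pvBCount tagL
        ((s.drop ((PySem.Chars.find s ('<' :: tagL ++ ['>'])).toNat + (tagL.length + 2))).drop
          ((PySem.Chars.find (s.drop ((PySem.Chars.find s ('<' :: tagL ++ ['>'])).toNat + (tagL.length + 2)))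
            ('<' :: '/' :: tagL ++ ['>'])).toNat + (tagL.length + 3)))
  termination_by s.length
  decreasing_by
    have hinf : ('<' :: tagL ++ ['>']) <:+: s := (PySem.Chars.find_ne_neg_one_iff s _).mp hp
    have hlen : ('<' :: tagL ++ ['>']).length ≤ s.length := hinf.length_le
    simp only [List.length_drop, List.length_cons, List.length_append] at *
    omega

def count_tags_recursive_alt (html : String) (tag : String) : Int :=
  pvBCount tag.toList html.toList

-- ===== PRECONDITION & SPEC =====
-- Pre_ excludes inputs whose tag contains '<' while the close tag occurs in the html: only
-- there can the close tag overlap an open-tag occurrence, where A's overlap-tolerant scan and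
-- the regex's non-overlapping matching are both defensible readings of an input that is not a
-- tag name.
def Pre_count_tags_recursive (html : String) (tag : String) : Prop :=
  '<' ∉ tag.toList ∨ ¬ ('<' :: '/' :: tag.toList ++ ['>']) <:+: html.toList
instance (html : String) (tag : String) : Decidable (Pre_count_tags_recursive html tag) := by
  unfold Pre_count_tags_recursive; infer_instance

def pvWitness_count_tags_recursive : String × String := ("<b>hi</b> <b>x</b><b></i>", "b")

def Spec_count_tags_recursive (html : String) (tag : String) (out : Int) : Prop := out = count_tags_recursive_alt html tag
instance (html : String) (tag : String) (out : Int) : Decidable (Spec_count_tags_recursive html tag out) := by unfold Spec_count_tags_recursive; infer_instance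

-- ===== CLAIM (what is proved, stated in full; the proofs are below) =====
def Claim_equal_count_tags_recursive : Prop := ∀ (html : String) (tag : String), Dom_count_tags_recursive html tag → Pre_count_tags_recursive html tag → Spec_count_tags_recursive html tag (count_tags_recursive html tag)

-- ===== LEMMAS AND PROOFS =====

-- a list that is a prefix of itself consed with c consists only of c's
lemma pv_prefix_cons_self {α : Type} : ∀ (l : List α) (c x : α), l <+: c :: l → x ∈ l → x = c := by
  intro l
  induction l with
  | nil => intro c x _ hx; cases hx
  | cons a l' ih =>
    intro c x hpre hx
    rw [List.cons_prefix_cons] at hpre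
    rcases hpre with ⟨rfl, hl⟩
    rcases List.mem_cons.mp hx with rfl | hx'
    · rfl
    · exact ih a x hl hx'

-- no occurrence of the close tag starts inside the open-tag occurrence
lemma pv_no_overlap {tagL t : List Char} (hP : '<' ∉ tagL)
    (hX : ('<' :: tagL ++ ['>']) <+: t) :
    ∀ d, d < tagL.length + 2 → ¬ ('<' :: '/' :: tagL ++ ['>']) <+: t.drop d := by
  intro d hd hY
  rcases Nat.eq_zero_or_pos d with rfl | hdpos
  · -- d = 0 : both tags would be prefixes of t, forcing X <+: Y, impossible
    simp only [List.drop_zero] at hY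
    rcases List.prefix_or_prefix_of_prefix hX hY with hXY | hYX
    · simp only [List.cons_append, List.cons_prefix_cons] at hXY
      have h2 := hXY.2
      have : ('>' : Char) = '/' := by
        refine pv_prefix_cons_self (tagL ++ ['>']) '/' '>' (by simpa using h2) ?_
        simp
      simp at this
    · have := hYX.length_le
      simp at this
  · -- d ≥ 1 : the character of the open tag at offset d would have to be '<'
    have hXlen : ('<' :: tagL ++ ['>']).length ≤ t.length := hX.length_le
    simp only [List.length_cons, List.length_append] at hXlen
    have hdt : d < t.length := by omega
    have hYc : (t.drop d)[0]'(by simp [List.length_drop]; omega) = '<' := by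
      have := hY.getElem (i := 0) (by simp)
      simpa using this.symm
    have hTd : t[d]'hdt = '<' := by
      rw [← hYc, List.getElem_drop]; simp
    have hXc := (hX.getElem (i := d) (by simp; omega)).trans hTd
    -- hXc : ('<' :: tagL ++ ['>'])[d] = '<', with 1 ≤ d ≤ tagL.length + 1
    simp only [List.cons_append] at hXc
    rcases Nat.exists_eq_add_of_lt hdpos with ⟨d', rfl⟩
    simp only [Nat.zero_add, List.getElem_cons_succ] at hXc
    by_cases hd' : d' < tagL.length
    · rw [List.getElem_append_left hd'] at hXc
      exact hP (hXc ▸ List.getElem_mem hd')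
    · have : d' = tagL.length := by omega
      subst this
      rw [List.getElem_append_right (by omega)] at hXc
      simp at hXc
  
-- first occurrence of the close tag at/after the open occurrence = first one after it
lemma pv_find_close {tagL t : List Char} (hP : '<' ∉ tagL)
    (hX : ('<' :: tagL ++ ['>']) <+: t) :
    PySem.Chars.find t ('<' :: '/' :: tagL ++ ['>']) =
      (if PySem.Chars.find (t.drop (tagL.length + 2)) ('<' :: '/' :: tagL ++ ['>']) = -1 then -1
       else (tagL.length + 2 : Int) + PySem.Chars.find (t.drop (tagL.length + 2)) ('<' :: '/' :: tagL ++ ['>'])) := by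
  set Y := ('<' :: '/' :: tagL ++ ['>']) with hYdef
  have hNOV := pv_no_overlap hP hX
  by_cases hn : PySem.Chars.find (t.drop (tagL.length + 2)) Y = -1
  · rw [if_pos hn]
    rw [PySem.Chars.find_eq_neg_one_iff] at hn ⊢
    intro hcon
    apply hn
    -- an occurrence of Y in t must start at some j; j < |X| is excluded, j ≥ |X| lands in the drop
    have hex : ∃ j, Y <+: t.drop j :=
      (PySem.Chars.exists_prefix_drop_iff_isIn (sub := Y) (s := t)).mpr
        ((PySem.Chars.isIn_iff_infix (sub := Y) (s := t)).mpr hcon)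
    rcases hex with ⟨j, hj⟩
    have hjge : tagL.length + 2 ≤ j := by
      by_contra hlt
      exact hNOV j (by omega) hj
    have : Y <+: (t.drop (tagL.length + 2)).drop (j - (tagL.length + 2)) := by
      rw [List.drop_drop, show tagL.length + 2 + (j - (tagL.length + 2)) = j from by omega]
      exact hj
    exact this.isInfix.trans (List.drop_suffix _ _).isInfix
  · rw [if_neg hn]
    have hn0 : 0 ≤ PySem.Chars.find (t.drop (tagL.length + 2)) Y := by
      have := PySem.Chars.neg_one_le_find (t.drop (tagL.length + 2)) Y
      omega
    set n := PySem.Chars.find (t.drop (tagL.length + 2)) Y with hndef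
    obtain ⟨hocc, hmin⟩ := PySem.Chars.find_spec (s := t.drop (tagL.length + 2)) (sub := Y) hn0
    rw [← hndef] at hocc hmin
    have hoccT : Y <+: t.drop (tagL.length + 2 + n.toNat) := by
      have h2 := hocc
      rw [List.drop_drop] at h2
      exact h2
    -- find t Y is some m ≥ 0
    have hmex : PySem.Chars.find t Y ≠ -1 := by
      rw [PySem.Chars.find_ne_neg_one_iff]
      exact hoccT.isInfix.trans (List.drop_suffix _ _).isInfix
    have hm0 : 0 ≤ PySem.Chars.find t Y := by
      have := PySem.Chars.neg_one_le_find t Y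
      omega
    set m := PySem.Chars.find t Y with hmdef
    obtain ⟨hmocc, hmmin⟩ := PySem.Chars.find_spec (s := t) (sub := Y) hm0
    rw [← hmdef] at hmocc hmmin
    -- m.toNat = tagL.length + 2 + n.toNat
    have hle : m.toNat ≤ tagL.length + 2 + n.toNat := by
      by_contra hgt
      exact hmmin (tagL.length + 2 + n.toNat) (by omega) hoccT
    have hge1 : ¬ m.toNat < tagL.length + 2 := fun h => hNOV m.toNat h hmocc
    have hge : tagL.length + 2 + n.toNat ≤ m.toNat := by
      by_contra hlt
      have hi : m.toNat - (tagL.length + 2) < n.toNat := by omega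
      apply hmin (m.toNat - (tagL.length + 2)) hi
      rw [List.drop_drop, show tagL.length + 2 + (m.toNat - (tagL.length + 2)) = m.toNat from by omega]
      exact hmocc
    omega

-- main loop correspondence: A's indexed loop from k equals c plus B's count on the suffix
lemma pv_main {tagL : List Char} (h : List Char) (hP : '<' ∉ tagL) :
    ∀ (fuel k : Nat) (c : Int), k ≤ h.length → h.length < fuel + k →
      pvALoop h ('<' :: tagL ++ ['>']) ('<' :: '/' :: tagL ++ ['>']) fuel (k : Int) c
        = c + pvBCount tagL (h.drop k) := by
  intro fuel
  induction fuel with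
  | zero => intro k c hk hfuel; omega
  | succ fuel ih =>
    intro k c hk hfuel
    set X := ('<' :: tagL ++ ['>']) with hXdef
    set Y := ('<' :: '/' :: tagL ++ ['>']) with hYdef
    have hXlenv : X.length = tagL.length + 2 := by simp [hXdef]
    have hYlenv : Y.length = tagL.length + 3 := by simp [hYdef]
    rcases Nat.lt_or_ge k h.length with hklt | hkge
    · -- guard true
      rw [pvALoop, if_pos (by exact_mod_cast hklt), PySem.Chars.findFrom_natCast h X k hk]
      set m := PySem.Chars.find (h.drop k) X with hmdef
      by_cases hm : m = -1
      · rw [if_pos hm, if_pos rfl, pvBCount, ← hmdef, dif_pos hm]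
        omega
      · have hm0 : 0 ≤ m := by
          have := PySem.Chars.neg_one_le_find (h.drop k) X
          omega
        rw [if_neg hm, if_neg (show ¬((k : Int) + m = -1) from by omega)]
        obtain ⟨hXocc, -⟩ := PySem.Chars.find_spec (s := h.drop k) (sub := X) hm0
        rw [← hmdef, List.drop_drop] at hXocc
        have hXlen : X.length ≤ (h.drop (k + m.toNat)).length := hXocc.length_le
        rw [List.length_drop, hXlenv] at hXlen
        -- A's close-tag search from p equals the search from p + len(open), by pv_find_close
        rw [show (k : Int) + m = ((k + m.toNat : Nat) : Int) from by push_cast; omega,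
          PySem.Chars.findFrom_natCast h Y (k + m.toNat) (by omega)]
        have hfc := pv_find_close (t := h.drop (k + m.toNat)) hP hXocc
        rw [← hYdef, List.drop_drop] at hfc
        rw [hfc]
        set n := PySem.Chars.find (h.drop (k + m.toNat + (tagL.length + 2))) Y with hndef
        by_cases hn : n = -1
        · rw [if_pos hn, if_pos rfl, pvBCount, ← hmdef, dif_neg hm, List.drop_drop,
            show k + (m.toNat + (tagL.length + 2)) = k + m.toNat + (tagL.length + 2) from by omega,
            ← hndef, dif_pos hn]
          omega
        · have hn0 : 0 ≤ n := by
            have := PySem.Chars.neg_one_le_find (h.drop (k + m.toNat + (tagL.length + 2))) Y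
            omega
          rw [if_neg hn,
            if_neg (show ¬((tagL.length : Int) + 2 + n = -1) from by push_cast; omega),
            if_neg (show ¬(((k + m.toNat : Nat) : Int) + ((tagL.length : Int) + 2 + n) = -1) from by
              omega)]
          obtain ⟨hYocc, -⟩ :=
            PySem.Chars.find_spec (s := h.drop (k + m.toNat + (tagL.length + 2))) (sub := Y) hn0
          rw [← hndef, List.drop_drop] at hYocc
          have hYlen : Y.length ≤ (h.drop (k + m.toNat + (tagL.length + 2) + n.toNat)).length :=
            hYocc.length_le
          rw [List.length_drop, hYlenv] at hYlen
          -- next start index, as a Nat cast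
          rw [show ((k + m.toNat : Nat) : Int) + ((tagL.length : Int) + 2 + n) + (Y.length : Int)
              = ((k + m.toNat + (tagL.length + 2) + n.toNat + (tagL.length + 3) : Nat) : Int) from by
            rw [hYlenv]; push_cast; omega]
          -- unfold B one step
          rw [pvBCount, ← hmdef, dif_neg hm, List.drop_drop,
            show k + (m.toNat + (tagL.length + 2)) = k + m.toNat + (tagL.length + 2) from by omega,
            ← hndef, dif_neg hn, List.drop_drop,
            show k + m.toNat + (tagL.length + 2) + (n.toNat + (tagL.length + 3))
              = k + m.toNat + (tagL.length + 2) + n.toNat + (tagL.length + 3) from by omega]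
          rw [ih (k + m.toNat + (tagL.length + 2) + n.toNat + (tagL.length + 3)) (c + 1)
            (by omega) (by omega)]
          omega
    · -- k = h.length : guard false, and B finds nothing in the empty suffix
      have hkeq : k = h.length := by omega
      rw [pvALoop]
      rw [if_neg (show ¬((k : Int) < (h.length : Int)) from by omega)]
      rw [hkeq, List.drop_length]
      rw [pvBCount, dif_pos (by rw [PySem.Chars.find_eq_neg_one_iff]; simp)]
      omega

-- if the close tag occurs nowhere in the html, A's loop never increments its count
lemma pv_noY_A {tagL h : List Char} (hni : ¬ ('<' :: '/' :: tagL ++ ['>']) <:+: h) :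
    ∀ (fuel k : Nat) (c : Int), k ≤ h.length →
      pvALoop h ('<' :: tagL ++ ['>']) ('<' :: '/' :: tagL ++ ['>']) fuel (k : Int) c = c := by
  intro fuel k c hk
  set X := ('<' :: tagL ++ ['>']) with hXdef
  set Y := ('<' :: '/' :: tagL ++ ['>']) with hYdef
  cases fuel with
  | zero => rw [pvALoop]
  | succ fuel =>
    rw [pvALoop]
    split
    · rw [PySem.Chars.findFrom_natCast h X k hk]
      set m := PySem.Chars.find (h.drop k) X with hmdef
      by_cases hm : m = -1
      · rw [if_pos hm]
        simp
      · have hm0 : 0 ≤ m := by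
          have := PySem.Chars.neg_one_le_find (h.drop k) X
          omega
        rw [if_neg hm]
        obtain ⟨hXocc, -⟩ := PySem.Chars.find_spec (s := h.drop k) (sub := X) hm0
        rw [← hmdef, List.drop_drop] at hXocc
        have hXlen : X.length ≤ (h.drop (k + m.toNat)).length := hXocc.length_le
        rw [show (k : Int) + m = ((k + m.toNat : Nat) : Int) from by push_cast; omega,
          PySem.Chars.findFrom_natCast h Y (k + m.toNat) (by
            rw [List.length_drop] at hXlen
            have : 0 < X.length := by simp [hXdef]
            omega)]
        have hq : PySem.Chars.find (h.drop (k + m.toNat)) Y = -1 := by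
          rw [PySem.Chars.find_eq_neg_one_iff]
          exact fun hc => hni (hc.trans (List.drop_suffix _ _).isInfix)
        rw [hq]
        simp
    · rfl

-- likewise B counts nothing without an occurrence of the close tag
lemma pv_noY_B {tagL s : List Char} (hni : ¬ ('<' :: '/' :: tagL ++ ['>']) <:+: s) :
    pvBCount tagL s = 0 := by
  rw [pvBCount]
  by_cases hm : PySem.Chars.find s ('<' :: tagL ++ ['>']) = -1
  · rw [dif_pos hm]
  · rw [dif_neg hm, dif_pos (by
      rw [PySem.Chars.find_eq_neg_one_iff]
      exact fun hc => hni (hc.trans (List.drop_suffix _ _).isInfix))]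

-- ===== VERDICT (by name: the statement is the Claim_ definition above) =====
theorem count_tags_recursive_spec : Claim_equal_count_tags_recursive := by
  intro html tag _ hpre
  unfold Spec_count_tags_recursive count_tags_recursive count_tags_recursive_alt
  rcases hpre with hP | hni
  · have := pv_main (tagL := tag.toList) html.toList hP (html.toList.length + 1) 0 0
      (Nat.zero_le _) (by omega)
    simpa using this
  · have hA := pv_noY_A (tagL := tag.toList) hni (html.toList.length + 1) 0 0 (Nat.zero_le _)
    have hB := pv_noY_B (tagL := tag.toList) hni
    simp only [Nat.cast_zero] at hA
    rw [hA, hB]
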